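-- pv_equiv track=rewrite | github.com/mbbiernacki/EECS348_Assignment2 | Assignment2.py | getPuzzle
-- ===== SOURCE A (Python) =====
-- import math
--
-- def getPuzzle(originalString):
--     # the number of rows is equivalent to the square root of the length of the string (square root of 81 = 9)
--     num_rows = int(math.sqrt(len(originalString)))
--
--     # sudoku puzzles are square, therefore the number of columns is equal to the number of rows
--     num_cols = num_rows
--
--     # create an empty 2D list
--     # for every row, create a list within the puzzleBoard list (resulting in a 2D list)
--     puzzleBoard = [[] for i in range(num_rows)]
--
--     # use a for loop to extract numbers from the specific row and add to the correct location
--     for row in range(num_rows):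
--         # slice the original string into sections that are the length of num_cols
--         ## row * num_cols --> the starting index (inclusive)
--         ## (row*num_cols) + num_cols --> the ending index (exclusive)
--         row_string = originalString[(row*num_cols):(row*num_cols) + num_cols]
--
--         # for each character in the row_string, convert it into an integer and store it in the corresponding row
--         puzzleBoard[row] = [int(num) for num in row_string]
--
--     # return the puzzleBoard
--     return puzzleBoard
-- ===== SOURCE B (Python) =====
-- import math
--
-- def getPuzzle(originalString):
--     n = int(math.sqrt(len(originalString)))
--     flat = [int(c) for c in originalString[:n * n]]
--
--     def chunk(xs):
--         if not xs:
--             return []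
--         return [xs[:n]] + chunk(xs[n:])
--
--     return chunk(flat)
-- ===== Notes on version B (the rewrite author's own statement) =====
-- stated objective: alternative
-- what changed: B converts the first n*n characters to ints in one flat pass and then chunks the flat list into rows recursively, instead of A's per-row string slicing with a conversion comprehension inside each row.
import Mathlib
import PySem

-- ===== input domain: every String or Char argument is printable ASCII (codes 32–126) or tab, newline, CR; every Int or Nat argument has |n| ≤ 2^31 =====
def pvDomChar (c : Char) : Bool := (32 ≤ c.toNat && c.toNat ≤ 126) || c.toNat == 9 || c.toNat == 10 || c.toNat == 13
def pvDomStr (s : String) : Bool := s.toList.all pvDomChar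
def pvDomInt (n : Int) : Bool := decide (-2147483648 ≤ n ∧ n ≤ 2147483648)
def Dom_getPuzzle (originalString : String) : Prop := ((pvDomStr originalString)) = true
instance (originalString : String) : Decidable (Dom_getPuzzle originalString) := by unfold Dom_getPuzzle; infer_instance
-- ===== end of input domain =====

-- B builds the flat int list of the first n*n characters in one pass and chunks it into rows
-- recursively, instead of A's per-row string slicing; objective: alternative decomposition.


-- shared helper: int(math.sqrt(m)) for a Nat m = floor square root (exact: math.sqrt is exact on
-- these small lengths); written as a fold so the kernel can evaluate it
def pvSqrt (m : Nat) : Nat :=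
  (List.range (m + 1)).foldl (fun acc r => if r * r ≤ m then r else acc) 0

-- shared helper: Python's int(c) for a single character (exact on digits; Pre_ admits only digits)
def pyDigit (c : Char) : Int := (PySem.Int.ofChars? [c]).getD 0

-- ===== PORT A =====
def getPuzzle (originalString : String) : List (List Int) :=
  let cs := originalString.toList
  let numRows := pvSqrt cs.length
  let numCols := numRows
  let puzzleBoard : List (List Int) := (List.range numRows).map (fun _ => [])
  (List.range numRows).foldl
    (fun board row =>
      let rowString := PySem.List.slice cs (some ((row * numCols : Nat) : Int))
        (some ((row * numCols + numCols : Nat) : Int))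
      board.set row (rowString.map pyDigit))
    puzzleBoard

-- ===== PORT B =====
def chunkRows (n : Nat) : List Int → List (List Int)
  | [] => []
  | x :: xs => (x :: xs.take (n - 1)) :: chunkRows n (xs.drop (n - 1))
  termination_by l => l.length
  decreasing_by simp

def getPuzzle_alt (originalString : String) : List (List Int) :=
  let cs := originalString.toList
  let n := pvSqrt cs.length
  let flat := (cs.take (n * n)).map pyDigit
  chunkRows n flat

-- ===== PRECONDITION & SPEC =====
-- Pre_ excludes exactly the inputs where A raises ValueError: one of the first n*n characters
-- is not a decimal digit, so int(c) fails (B raises there as well).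
def Pre_getPuzzle (originalString : String) : Prop :=
  ((originalString.toList.take
      (pvSqrt originalString.toList.length * pvSqrt originalString.toList.length)).all
    (fun c => c.isDigit)) = true
instance (originalString : String) : Decidable (Pre_getPuzzle originalString) := by
  unfold Pre_getPuzzle; infer_instance

def pvWitness_getPuzzle : String := "123456789"

def Spec_getPuzzle (originalString : String) (out : List (List Int)) : Prop := out = getPuzzle_alt originalString
instance (originalString : String) (out : List (List Int)) : Decidable (Spec_getPuzzle originalString out) := by unfold Spec_getPuzzle; infer_instance

-- ===== CLAIM (what is proved, stated in full; the proofs are below) =====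
def Claim_equal_getPuzzle : Prop := ∀ (originalString : String), Dom_getPuzzle originalString → Pre_getPuzzle originalString → Spec_getPuzzle originalString (getPuzzle originalString)

-- ===== LEMMAS AND PROOFS =====

-- the fold computing the floor square root never exceeds its bound
theorem pvSqrt_le (m : Nat) : pvSqrt m * pvSqrt m ≤ m := by
  unfold pvSqrt
  suffices h : ∀ (l : List Nat) (init : Nat), init * init ≤ m →
      (l.foldl (fun acc r => if r * r ≤ m then r else acc) init) *
        (l.foldl (fun acc r => if r * r ≤ m then r else acc) init) ≤ m by
    exact h _ 0 (by simp)
  intro l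
  induction l with
  | nil => intro init h; simpa using h
  | cons r l ih =>
    intro init h
    simp only [List.foldl_cons]
    by_cases hr : r * r ≤ m
    · simp only [hr, if_true]; exact ih r hr
    · simp only [hr, if_false]; exact ih init h

-- A's assignment loop: setting every index of a long-enough board in ascending order is a map.
theorem foldl_set_eq_map (f : Nat → List Int) :
    ∀ (m : Nat) (b0 : List (List Int)), m ≤ b0.length →
      (List.range m).foldl (fun b r => b.set r (f r)) b0
        = (List.range m).map f ++ b0.drop m := by
  intro m
  induction m with
  | zero => simp
  | succ m ih =>
    intro b0 hm
    rw [List.range_succ, List.foldl_append, ih b0 (by omega)]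
    simp only [List.foldl_cons, List.foldl_nil]
    have hlen : ((List.range m).map f).length = m := by simp
    rw [List.set_append, hlen]
    simp only [lt_self_iff_false, if_false, Nat.sub_self]
    rw [List.drop_eq_getElem_cons (show m < b0.length by omega), List.set_cons_zero]
    simp

-- B's recursive chunking of a list of length m * n (n ≥ 1) yields the m drop/take rows.
theorem chunkRows_eq_map (n : Nat) (hn : 1 ≤ n) :
    ∀ (m : Nat) (l : List Int), l.length = m * n →
      chunkRows n l = (List.range m).map (fun r => (l.drop (r * n)).take n) := by
  intro m
  induction m with
  | zero =>
    intro l hl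
    have : l = [] := List.eq_nil_of_length_eq_zero (by simpa using hl)
    subst this; simp [chunkRows]
  | succ m ih =>
    intro l hl
    have hpos : 0 < l.length := by rw [hl]; positivity
    obtain ⟨x, xs, rfl⟩ : ∃ x xs, l = x :: xs := by
      cases l with
      | nil => simp at hpos
      | cons a b => exact ⟨a, b, rfl⟩
    rw [show chunkRows n (x :: xs) = (x :: xs.take (n - 1)) :: chunkRows n (xs.drop (n - 1)) from by
      simp [chunkRows]]
    have hl' : xs.length + 1 = m * n + n := by
      have h := hl; simp [Nat.succ_mul] at h; omega
    have hxs : (xs.drop (n - 1)).length = m * n := by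
      simp; omega
    rw [ih _ hxs, List.range_succ_eq_map]
    simp only [List.map_cons, List.map_map]
    obtain ⟨k, rfl⟩ : ∃ k, n = k + 1 := ⟨n - 1, by omega⟩
    rw [List.cons_eq_cons]
    constructor
    · -- first row
      simp
    · -- remaining rows
      apply List.map_congr_left
      intro r _
      simp only [Function.comp_apply]
      rw [show (k + 1) - 1 = k from rfl, show xs.drop k = (x :: xs).drop (k + 1) from by simp,
        List.drop_drop]
      congr 2
      have := Nat.succ_mul r (k + 1)
      omega

theorem getPuzzle_spec : Claim_equal_getPuzzle := by
  intro s _ _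
  unfold Spec_getPuzzle getPuzzle getPuzzle_alt
  simp only [PySem.List.slice_natCast]
  generalize s.toList = cs
  have hsq : pvSqrt cs.length * pvSqrt cs.length ≤ cs.length := pvSqrt_le cs.length
  generalize hn : pvSqrt cs.length = n at hsq
  -- A side: the assignment loop is a map of the n row slices
  rw [foldl_set_eq_map _ n ((List.range n).map _) (by simp)]
  rw [List.drop_eq_nil_of_le (by simp), List.append_nil]
  -- B side
  by_cases h0 : n = 0
  · subst h0; simp [chunkRows]
  · have hn1 : 1 ≤ n := by omega
    have hflat : ((cs.take (n * n)).map pyDigit).length = n * n := by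
      simp; omega
    rw [chunkRows_eq_map n hn1 n _ hflat]
    apply List.map_congr_left
    intro r hr
    have hrn : r < n := List.mem_range.mp hr
    rw [Nat.add_sub_cancel_left]
    -- push the conversion map through drop/take, then remove the inner take (n*n)
    rw [← List.map_drop, ← List.map_take]
    congr 1
    have h : r * n + n ≤ n * n := by nlinarith
    rw [List.drop_take, List.take_take,
      Nat.min_eq_left (Nat.le_sub_of_add_le (by linarith [h]))]
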